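-- pv_equiv track=rewrite | github.com/Watchfulio/watchful-py | src/watchful/attributes.py | contig_spans
-- ===== SOURCE A (Python) =====
-- from typing import Callable, Dict, List, Optional, Tuple
--
-- def contig_spans(spans: List[Tuple[int, int]]) -> List[int]:
--     """
--     This function decodes a list of spans, i.e.
--     [(start_1, end,_1), ..., (start_N, end_N)] to a list of contiguous spans,
--     i.e. [gap_len_1, span_len_1, ..., gap_len_N, span_len_N].
--
--     :param spans: The list of spans.
--     :type spans: List[Tuple[int, int]]
--     :return: The list of contiguous spans.
--     :rtype: List[int]
--     """
--
--     contig = []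
--     offset = 0
--     for a, b in spans:
--         contig.append(a - offset)
--         contig.append(b - a)
--         offset = b
--
--     return contig
-- ===== SOURCE B (Python) =====
-- def contig_spans(spans):
--     """Flatten 0 plus all span endpoints into one boundary list, then return
--     the adjacent (telescoping) differences of that list."""
--     bounds = [0] + [x for span in spans for x in span]
--     return [hi - lo for lo, hi in zip(bounds, bounds[1:])]
-- ===== Notes on version B (the rewrite author's own statement) =====
-- stated objective: alternative
-- what changed: Instead of threading a running offset and emitting (a-offset, b-a) per span, B flattens [0]+all endpoints into a single boundary list and returns its adjacent differences (a telescoping-differences algorithm with no per-span arithmetic).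
import Mathlib
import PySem

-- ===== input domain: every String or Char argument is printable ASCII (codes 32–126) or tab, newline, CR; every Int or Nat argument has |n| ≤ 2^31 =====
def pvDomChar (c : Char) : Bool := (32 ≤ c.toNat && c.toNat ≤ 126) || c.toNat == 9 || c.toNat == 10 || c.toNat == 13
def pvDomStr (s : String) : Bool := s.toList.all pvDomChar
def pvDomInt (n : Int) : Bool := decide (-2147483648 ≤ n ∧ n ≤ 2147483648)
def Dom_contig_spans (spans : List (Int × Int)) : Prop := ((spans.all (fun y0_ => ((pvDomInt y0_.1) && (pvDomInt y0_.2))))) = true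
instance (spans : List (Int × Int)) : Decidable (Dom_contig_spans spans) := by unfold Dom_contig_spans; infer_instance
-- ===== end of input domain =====

-- B replaces A's running-offset loop with a telescoping formulation: flatten 0 and all endpoints into one boundary list and take its adjacent differences (alternative decomposition, same cost).


-- ===== PORT A =====
def contig_spans (spans : List (Int × Int)) : List Int :=
  (spans.foldl (fun (st : List Int × Int) p =>
      (st.1 ++ [p.1 - st.2, p.2 - p.1], p.2)) ([], 0)).1

-- ===== PORT B =====
def contig_spans_alt (spans : List (Int × Int)) : List Int :=
  let bounds : List Int := 0 :: spans.flatMap (fun p => [p.1, p.2])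
  (bounds.zip bounds.tail).map (fun x => x.2 - x.1)

-- ===== PRECONDITION & SPEC =====
def Spec_contig_spans (spans : List (Int × Int)) (out : List Int) : Prop := out = contig_spans_alt spans
instance (spans : List (Int × Int)) (out : List Int) : Decidable (Spec_contig_spans spans out) := by unfold Spec_contig_spans; infer_instance

-- ===== CLAIM (what is proved, stated in full; the proofs are below) =====
def Claim_equal_contig_spans : Prop := ∀ (spans : List (Int × Int)), Dom_contig_spans spans → Spec_contig_spans spans (contig_spans spans)

-- ===== LEMMAS AND PROOFS =====

-- ===== VERDICT (by name: the statement is the Claim_ definition above) =====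
-- A's fold with any starting accumulator/offset equals the accumulator followed by
-- the adjacent differences of the boundary list (off :: flattened endpoints).
theorem contig_spans_fold (spans : List (Int × Int)) (acc : List Int) (off : Int) :
    (spans.foldl (fun (st : List Int × Int) p =>
      (st.1 ++ [p.1 - st.2, p.2 - p.1], p.2)) (acc, off)).1 =
    acc ++ (((off :: spans.flatMap (fun p => [p.1, p.2])).zip
      ((off :: spans.flatMap (fun p => [p.1, p.2])).tail)).map (fun x => x.2 - x.1)) := by
  induction spans generalizing acc off with
  | nil => simp
  | cons p rest ih =>
    rw [List.foldl_cons, ih]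
    simp

theorem contig_spans_spec : Claim_equal_contig_spans := by
  intro spans _
  unfold Spec_contig_spans contig_spans contig_spans_alt
  exact contig_spans_fold spans [] 0
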